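-- pv_equiv track=rewrite | github.com/micked/MODEST | mage_tool/mutation_tools.py | compare_seqs
-- ===== SOURCE A (Python) =====
-- def compare_seqs(parent, child):
--     """Compare two sequences and return number of mutations
--
--     return value is a tuple containing number of differences and a bool
--     describing number of groups.
--     """
--     if len(parent) != len(child):
--         raise ValueError("parent {} and child {} must be same length".format(len(parent), len(child)))
--
--     parent = parent.upper()
--     child = child.upper()
--
--     muts = 0
--     groups = 0
--     on_mut = False
--
--     for p,m in zip(parent,child):
--         if p == m:
--             on_mut = False
--         else:
--             muts += 1
--             if not on_mut:
--                 groups += 1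
--             on_mut = True
--
--     return muts, groups
-- ===== SOURCE B (Python) =====
-- def _span(pairs, i, same):
--     """First index j >= i where the match-status of pairs[j] differs from `same` (or len)."""
--     j = i
--     while j < len(pairs) and (pairs[j][0] == pairs[j][1]) == same:
--         j += 1
--     return j
--
--
-- def compare_seqs(parent, child):
--     """Compare two sequences and return number of mutations
--
--     return value is a tuple containing number of differences and a bool
--     describing number of groups.
--     """
--     if len(parent) != len(child):
--         raise ValueError("parent {} and child {} must be same length".format(len(parent), len(child)))
--
--     pairs = list(zip(parent.upper(), child.upper()))
--     muts = 0
--     groups = 0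
--     i = 0
--     while i < len(pairs):
--         # consume one maximal block (all matches or all mismatches) at a time
--         if pairs[i][0] == pairs[i][1]:
--             i = _span(pairs, i, True)
--         else:
--             j = _span(pairs, i, False)
--             muts += j - i
--             groups += 1
--             i = j
--     return muts, groups
-- ===== Notes on version B (the rewrite author's own statement) =====
-- stated objective: alternative
-- what changed: Replaces A's per-position scan with an on_mut flag by a run-length decomposition: B's outer loop consumes one maximal block of matches or mismatches at a time (block end found by a prefix-scan helper), adding each mismatch block's length to muts and 1 to groups; Pre_ excludes only unequal-length inputs, where A raises ValueError.
import Mathlib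
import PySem

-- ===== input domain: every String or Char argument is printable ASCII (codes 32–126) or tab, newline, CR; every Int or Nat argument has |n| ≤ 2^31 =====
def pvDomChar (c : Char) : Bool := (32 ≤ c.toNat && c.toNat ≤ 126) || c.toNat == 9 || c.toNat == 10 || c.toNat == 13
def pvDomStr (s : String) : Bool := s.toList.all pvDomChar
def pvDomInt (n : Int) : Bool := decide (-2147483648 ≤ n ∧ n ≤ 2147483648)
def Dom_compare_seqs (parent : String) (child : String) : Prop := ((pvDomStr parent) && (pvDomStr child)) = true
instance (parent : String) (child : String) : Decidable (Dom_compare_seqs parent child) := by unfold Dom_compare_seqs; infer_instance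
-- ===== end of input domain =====

-- B replaces A's per-position on_mut scan by a run-length decomposition (recursively consume maximal matched/mismatched blocks); objective: alternative.


-- ===== PORT A =====
def compare_seqs (parent : String) (child : String) : Int × Int :=
  let p := PySem.Chars.upper parent.toList
  let c := PySem.Chars.upper child.toList
  let st : Int × Int × Bool :=
    (p.zip c).foldl (fun (s : Int × Int × Bool) pm =>
      if pm.1 == pm.2 then (s.1, s.2.1, false)
      else (s.1 + 1, if !s.2.2 then s.2.1 + 1 else s.2.1, true)) (0, 0, false)
  (st.1, st.2.1)

-- ===== PORT B =====
-- _span(pairs, same): length of the maximal prefix whose match-status equals `same` (the while loop scans from the front)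
def pvSpan (same : Bool) : List (Char × Char) → Nat
  | [] => 0
  | pm :: rest => if (pm.1 == pm.2) == same then pvSpan same rest + 1 else 0

theorem pvSpan_pos (same : Bool) (pm : Char × Char) (rest : List (Char × Char))
    (h : (pm.1 == pm.2) = same) :
    (List.drop (pvSpan same (pm :: rest)) (pm :: rest)).length < (pm :: rest).length := by
  have h1 : 0 < pvSpan same (pm :: rest) := by simp [pvSpan, h]
  simp only [List.length_drop, List.length_cons]
  omega

-- the outer while loop consumes one maximal block per step: tail recursion on the suffix with accumulators
def pvLoop : List (Char × Char) → Int → Int → Int × Int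
  | [], muts, groups => (muts, groups)
  | pm :: rest, muts, groups =>
    if h : pm.1 == pm.2 then
      pvLoop ((pm :: rest).drop (pvSpan true (pm :: rest))) muts groups
    else
      let i := pvSpan false (pm :: rest)
      pvLoop ((pm :: rest).drop i) (muts + (i : Int)) (groups + 1)
  termination_by l => l.length
  decreasing_by
  · exact pvSpan_pos true pm rest (by simpa using h)
  · exact pvSpan_pos false pm rest (by simpa using h)

def compare_seqs_alt (parent : String) (child : String) : Int × Int :=
  pvLoop ((PySem.Chars.upper parent.toList).zip (PySem.Chars.upper child.toList)) 0 0

-- ===== PRECONDITION & SPEC =====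
-- Pre_ excludes only the unequal-length inputs, where A raises ValueError.
def Pre_compare_seqs (parent : String) (child : String) : Prop :=
  parent.toList.length = child.toList.length
instance (parent : String) (child : String) : Decidable (Pre_compare_seqs parent child) := by
  unfold Pre_compare_seqs; infer_instance
def pvWitness_compare_seqs : String × String := ("ACGT", "AGGA")

def Spec_compare_seqs (parent : String) (child : String) (out : Int × Int) : Prop := out = compare_seqs_alt parent child
instance (parent : String) (child : String) (out : Int × Int) : Decidable (Spec_compare_seqs parent child out) := by unfold Spec_compare_seqs; infer_instance

-- ===== CLAIM (what is proved, stated in full; the proofs are below) =====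
def Claim_equal_compare_seqs : Prop := ∀ (parent : String) (child : String), Dom_compare_seqs parent child → Pre_compare_seqs parent child → Spec_compare_seqs parent child (compare_seqs parent child)

-- ===== LEMMAS AND PROOFS =====

-- A's loop body, named (used only by the proofs)
def pvStepA (s : Int × Int × Bool) (pm : Char × Char) : Int × Int × Bool :=
  if pm.1 == pm.2 then (s.1, s.2.1, false)
  else (s.1 + 1, if !s.2.2 then s.2.1 + 1 else s.2.1, true)

-- A's fold jumps over a maximal matched block without changing the counters
theorem pvFoldl_drop_span_true (l : List (Char × Char)) : ∀ (m g : Int) (o : Bool),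
    List.foldl pvStepA (m, g, o) l
      = List.foldl pvStepA (m, g, if pvSpan true l = 0 then o else false)
          (l.drop (pvSpan true l)) := by
  induction l with
  | nil => intro m g o; simp [pvSpan]
  | cons pm rest ih =>
    intro m g o
    by_cases h : pm.1 == pm.2
    · have hs : pvSpan true (pm :: rest) = pvSpan true rest + 1 := by simp [pvSpan, h]
      have hstep : pvStepA (m, g, o) pm = (m, g, false) := by simp [pvStepA, h]
      rw [hs, List.foldl_cons, hstep, List.drop_succ_cons, ih m g false]
      have : (if pvSpan true rest = 0 then false else false)
           = (if pvSpan true rest + 1 = 0 then o else false) := by simp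
      rw [this]
    · have hs : pvSpan true (pm :: rest) = 0 := by simp [pvSpan, h]
      rw [hs]
      simp

-- A's fold jumps over a maximal mismatch block, already inside a group (flag true)
theorem pvFoldl_drop_span_false (l : List (Char × Char)) : ∀ (m g : Int),
    List.foldl pvStepA (m, g, true) l
      = List.foldl pvStepA (m + (pvSpan false l : Int), g, true)
          (l.drop (pvSpan false l)) := by
  induction l with
  | nil => intro m g; simp [pvSpan]
  | cons pm rest ih =>
    intro m g
    by_cases h : pm.1 == pm.2
    · have hs : pvSpan false (pm :: rest) = 0 := by simp [pvSpan, h]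
      rw [hs]
      simp
    · have hs : pvSpan false (pm :: rest) = pvSpan false rest + 1 := by simp [pvSpan, h]
      have hstep : pvStepA (m, g, true) pm = (m + 1, g, true) := by simp [pvStepA, h]
      rw [hs, List.foldl_cons, hstep, List.drop_succ_cons, ih (m + 1) g]
      have : m + 1 + (pvSpan false rest : Int) = m + ((pvSpan false rest + 1 : Nat) : Int) := by
        push_cast; ring
      rw [this]

-- after the maximal mismatch block, the next pair (if any) matches
theorem pvHead_drop_span_false (l : List (Char × Char)) :
    ∀ pm' rest', l.drop (pvSpan false l) = pm' :: rest' → pm'.1 == pm'.2 := by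
  induction l with
  | nil => intro pm' rest' h; simp [pvSpan] at h
  | cons pm rest ih =>
    intro pm' rest' h
    by_cases hm : pm.1 == pm.2
    · have hs : pvSpan false (pm :: rest) = 0 := by simp [pvSpan, hm]
      rw [hs, List.drop_zero] at h
      rw [← (List.cons.injEq .. ).mp h |>.1]
      exact hm
    · have hs : pvSpan false (pm :: rest) = pvSpan false rest + 1 := by simp [pvSpan, hm]
      rw [hs, List.drop_succ_cons] at h
      exact ih pm' rest' h

-- the flag is irrelevant to the counters when the list is empty or starts with a match
theorem pvFlag_free (l : List (Char × Char)) (M G : Int)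
    (h : l = [] ∨ ∃ pm' rest', l = pm' :: rest' ∧ pm'.1 == pm'.2) :
    ((List.foldl pvStepA (M, G, true) l).1, (List.foldl pvStepA (M, G, true) l).2.1)
      = ((List.foldl pvStepA (M, G, false) l).1, (List.foldl pvStepA (M, G, false) l).2.1) := by
  rcases h with h | ⟨pm', rest', rfl, hm⟩
  · subst h; rfl
  · simp only [List.foldl_cons, pvStepA, if_pos hm]

-- main invariant: A's fold computes B's block loop
theorem pvMain (l : List (Char × Char)) (m g : Int) :
    ((List.foldl pvStepA (m, g, false) l).1, (List.foldl pvStepA (m, g, false) l).2.1)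
      = pvLoop l m g := by
  induction l, m, g using pvLoop.induct with
  | case1 m g => simp [pvLoop]
  | case2 pm rest m g h ih =>
    have hspan : pvSpan true (pm :: rest) ≠ 0 := by simp [pvSpan, h]
    rw [pvFoldl_drop_span_true (pm :: rest) m g false, if_neg hspan, ih, pvLoop]
    simp [h]
  | case3 pm rest m g h i ih =>
    have hs : pvSpan false (pm :: rest) = pvSpan false rest + 1 := by simp [pvSpan, h]
    have hstep : pvStepA (m, g, false) pm = (m + 1, g + 1, true) := by simp [pvStepA, h]
    rw [List.foldl_cons, hstep, pvFoldl_drop_span_false rest (m + 1) (g + 1)]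
    have hhead : rest.drop (pvSpan false rest) = [] ∨
        ∃ pm' rest', rest.drop (pvSpan false rest) = pm' :: rest' ∧ pm'.1 == pm'.2 := by
      cases hd : rest.drop (pvSpan false rest) with
      | nil => exact Or.inl rfl
      | cons pm' rest' => exact Or.inr ⟨pm', rest', rfl, pvHead_drop_span_false rest pm' rest' hd⟩
    have hid : List.drop i (pm :: rest) = List.drop (pvSpan false rest) rest := by
      rw [show i = pvSpan false (pm :: rest) from rfl, hs, List.drop_succ_cons]
    rw [hid] at ih
    have hmi : m + (i : Int) = m + 1 + (pvSpan false rest : Int) := by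
      rw [show i = pvSpan false (pm :: rest) from rfl, hs]; push_cast; ring
    rw [hmi] at ih
    rw [pvFlag_free _ _ _ hhead, ih]
    rw [pvLoop]
    simp only [dif_neg h, hs, List.drop_succ_cons]
    rw [show m + ((pvSpan false rest + 1 : Nat) : Int) = m + 1 + (pvSpan false rest : Int) by push_cast; ring]

-- ===== VERDICT (by name: the statement is the Claim_ definition above) =====
theorem compare_seqs_spec : Claim_equal_compare_seqs := by
  intro parent child _ _
  show ((List.foldl pvStepA (0, 0, false)
            ((PySem.Chars.upper parent.toList).zip (PySem.Chars.upper child.toList))).1,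
        (List.foldl pvStepA (0, 0, false)
            ((PySem.Chars.upper parent.toList).zip (PySem.Chars.upper child.toList))).2.1)
      = pvLoop ((PySem.Chars.upper parent.toList).zip (PySem.Chars.upper child.toList)) 0 0
  exact pvMain _ 0 0
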